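-- pv_equiv track=rewrite | github.com/azarab79/KnowledgeGraphVisualizer | llm_abstraction/enhanced_error_handler.py | _truncate_head
-- ===== SOURCE A (Python) =====
-- from typing import Dict, List, Optional, Any, Callable, Union
--
-- def _truncate_head(messages: List[Any], target_length: int) -> List[Any]:
--     """Keep the earliest messages."""
--     current_length = 0
--     result = []
--
--     for message in messages:
--         message_length = len(str(message))
--         if current_length + message_length <= target_length:
--             result.append(message)
--             current_length += message_length
--         else:
--             break
--
--     return result
-- ===== SOURCE B (Python) =====
-- from typing import Dict, List, Optional, Any, Callable, Union
--
-- def _truncate_head(messages: List[Any], target_length: int) -> List[Any]: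
--     """Keep the earliest messages (prefix-sum table + binary search for the cutoff)."""
--     # Build the full table of cumulative message lengths.
--     prefix = []
--     total = 0
--     for m in messages:
--         total += len(str(m))
--         prefix.append(total)
--     # prefix is non-decreasing (lengths are >= 0): binary-search the cutoff,
--     # i.e. the number of prefix sums <= target_length.
--     lo, hi = 0, len(prefix)
--     while lo < hi:
--         mid = (lo + hi) // 2
--         if prefix[mid] <= target_length:
--             lo = mid + 1
--         else:
--             hi = mid
--     return messages[:lo]
-- ===== Notes on version B (the rewrite author's own statement) =====
-- stated objective: alternative
-- what changed: Replaces A's single scan-with-early-break by building the full table of cumulative lengths and binary-searching it (prefix sums are non-decreasing) for the cutoff index, then slicing messages[:cutoff].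
import Mathlib
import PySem

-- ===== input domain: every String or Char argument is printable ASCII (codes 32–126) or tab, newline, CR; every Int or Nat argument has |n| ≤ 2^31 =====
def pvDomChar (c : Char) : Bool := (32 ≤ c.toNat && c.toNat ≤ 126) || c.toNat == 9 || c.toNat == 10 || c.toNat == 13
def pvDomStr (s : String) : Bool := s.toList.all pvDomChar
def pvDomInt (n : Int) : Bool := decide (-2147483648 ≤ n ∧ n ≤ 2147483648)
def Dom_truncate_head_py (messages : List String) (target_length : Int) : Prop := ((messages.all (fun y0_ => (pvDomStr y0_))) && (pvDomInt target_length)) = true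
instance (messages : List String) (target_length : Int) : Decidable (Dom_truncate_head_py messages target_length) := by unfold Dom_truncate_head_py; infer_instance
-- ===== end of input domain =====

-- B replaces A's scan-with-early-break by a prefix-sum table plus binary search for the
-- cutoff index (objective: alternative decomposition, same asymptotic cost).

-- ===== PORT A =====
-- the for-loop of A: state = (current_length, result); 'break' / loop end returns result
def truncAGo (target_length : Int) (msgs : List String) (current_length : Int)
    (result : List String) : List String :=
  match msgs with
  | [] => result
  | m :: rest =>
    let message_length := PySem.Str.len m   -- len(str(message)); str of a str is itself
    if current_length + message_length ≤ target_length then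
      truncAGo target_length rest (current_length + message_length) (result ++ [m])
    else
      result

def truncate_head_py (messages : List String) (target_length : Int) : List String :=
  truncAGo target_length messages 0 []

-- ===== PORT B =====
-- first loop of B: build the table of cumulative lengths; state = (prefix, total)
def buildPrefix (messages : List String) : List Int × Int :=
  messages.foldl
    (fun st m => (st.1 ++ [st.2 + PySem.Str.len m], st.2 + PySem.Str.len m)) ([], 0)

-- the while-loop of B: binary search; prefix[mid] is always in range, ported as getD
def bsearchGo (pfx : List Int) (target_length : Int) (lo hi : Nat) : Nat :=
  if h : lo < hi then
    let mid := (lo + hi) / 2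
    if pfx.getD mid 0 ≤ target_length then
      bsearchGo pfx target_length (mid + 1) hi
    else
      bsearchGo pfx target_length lo mid
  else lo
termination_by hi - lo
decreasing_by all_goals omega

def truncate_head_py_alt (messages : List String) (target_length : Int) : List String :=
  let pfx := (buildPrefix messages).1
  let lo := bsearchGo pfx target_length 0 pfx.length
  PySem.List.slice messages none (some (lo : Int))

-- ===== PRECONDITION & SPEC =====
def Spec_truncate_head_py (messages : List String) (target_length : Int) (out : List String) : Prop := out = truncate_head_py_alt messages target_length
instance (messages : List String) (target_length : Int) (out : List String) : Decidable (Spec_truncate_head_py messages target_length out) := by unfold Spec_truncate_head_py; infer_instance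

-- ===== CLAIM (what is proved, stated in full; the proofs are below) =====
def Claim_equal_truncate_head_py : Prop := ∀ (messages : List String) (target_length : Int), Dom_truncate_head_py messages target_length → Spec_truncate_head_py messages target_length (truncate_head_py messages target_length)

-- ===== LEMMAS AND PROOFS =====

-- number of messages A keeps, as structural recursion on the message list
def cnt (msgs : List String) (t : Int) : Nat :=
  match msgs with
  | [] => 0
  | m :: rest => if PySem.Str.len m ≤ t then 1 + cnt rest (t - PySem.Str.len m) else 0

-- cumulative length sums starting from a running total
def psums (msgs : List String) (tot : Int) : List Int :=
  match msgs with
  | [] => []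
  | m :: rest => (tot + PySem.Str.len m) :: psums rest (tot + PySem.Str.len m)

lemma truncAGo_eq (t : Int) (msgs : List String) : ∀ (cur : Int) (acc : List String),
    truncAGo t msgs cur acc = acc ++ msgs.take (cnt msgs (t - cur)) := by
  induction msgs with
  | nil => intro cur acc; simp [truncAGo, cnt]
  | cons m rest ih =>
    intro cur acc
    simp only [truncAGo, cnt]
    by_cases h : cur + PySem.Str.len m ≤ t
    · rw [if_pos h, if_pos (by omega), ih]
      have e : t - (cur + PySem.Str.len m) = t - cur - PySem.Str.len m := by ring
      rw [e, Nat.one_add, List.take_succ_cons, List.append_assoc, List.singleton_append]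
    · rw [if_neg h, if_neg (by omega)]
      simp

lemma buildPrefix_go (msgs : List String) : ∀ (acc : List Int) (tot : Int),
    msgs.foldl
      (fun st m => (st.1 ++ [st.2 + PySem.Str.len m], st.2 + PySem.Str.len m)) (acc, tot)
    = (acc ++ psums msgs tot, tot + (msgs.map PySem.Str.len).sum) := by
  induction msgs with
  | nil => intro acc tot; simp [psums]
  | cons m rest ih =>
    intro acc tot
    simp only [List.foldl_cons, psums, List.map_cons, List.sum_cons]
    rw [ih]
    simp [add_assoc]

lemma mem_psums_ge (msgs : List String) : ∀ (tot : Int) (x : Int), x ∈ psums msgs tot → tot ≤ x := by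
  induction msgs with
  | nil => intro tot x hx; simp [psums] at hx
  | cons m rest ih =>
    intro tot x hx
    have hm : (0:Int) ≤ PySem.Str.len m := by simp [PySem.Str.len_eq]
    simp only [psums, List.mem_cons] at hx
    rcases hx with h | h
    · omega
    · have := ih (tot + PySem.Str.len m) x h; omega

lemma psums_pairwise (msgs : List String) : ∀ (tot : Int),
    (psums msgs tot).Pairwise (· ≤ ·) := by
  induction msgs with
  | nil => intro tot; simp [psums]
  | cons m rest ih =>
    intro tot
    simp only [psums, List.pairwise_cons]
    exact ⟨fun x hx => mem_psums_ge rest _ x hx, ih _⟩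

lemma countP_psums (msgs : List String) : ∀ (tot t : Int),
    (psums msgs tot).countP (fun p => p ≤ t) = cnt msgs (t - tot) := by
  induction msgs with
  | nil => intro tot t; simp [psums, cnt]
  | cons m rest ih =>
    intro tot t
    have e : t - (tot + PySem.Str.len m) = t - tot - PySem.Str.len m := by ring
    have ihr := ih (tot + PySem.Str.len m) t
    rw [e] at ihr
    simp only [psums, cnt, List.countP_cons]
    by_cases h : tot + PySem.Str.len m ≤ t
    · rw [ihr, if_pos (show PySem.Str.len m ≤ t - tot by omega), if_pos (decide_eq_true h)]
      omega
    · have hz : (psums rest (tot + PySem.Str.len m)).countP (fun p => decide (p ≤ t)) = 0 := by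
        rw [List.countP_eq_zero]
        intro x hx
        have := mem_psums_ge rest _ x hx
        simp only [decide_eq_true_eq]
        omega
      rw [hz, if_neg (show ¬ PySem.Str.len m ≤ t - tot by omega),
        if_neg (by simp only [decide_eq_true_eq]; exact h)]

-- binary search on a nondecreasing list computes the number of elements ≤ t
lemma bsearchGo_eq (l : List Int) (t : Int) (hs : l.Pairwise (· ≤ ·)) :
    ∀ (d lo hi : Nat), hi - lo ≤ d → lo ≤ l.countP (fun p => p ≤ t) →
      l.countP (fun p => p ≤ t) ≤ hi → hi ≤ l.length →
      bsearchGo l t lo hi = l.countP (fun p => p ≤ t) := by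
  have hmono : ∀ (i j : Nat) (hi : i < l.length) (hj : j < l.length), i ≤ j → l[i] ≤ l[j] := by
    intro i j hi hj hij
    rcases Nat.lt_or_ge i j with h | h
    · exact (List.pairwise_iff_getElem.mp hs) i j hi hj h
    · have : i = j := by omega
      subst this; exact le_refl _
  intro d
  induction d with
  | zero =>
    intro lo hi hd h1 h2 _
    have : lo = hi := by omega
    subst this
    rw [bsearchGo]; simp; omega
  | succ d ih =>
    intro lo hi hd h1 h2 hlen
    rw [bsearchGo]
    by_cases h : lo < hi
    · rw [dif_pos h]
      set mid := (lo + hi) / 2 with hmid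
      have hmlt : mid < hi := by omega
      have hmlo : lo ≤ mid := by omega
      have hmlen : mid < l.length := by omega
      have hget : l.getD mid 0 = l[mid] := List.getD_eq_getElem l 0 hmlen
      by_cases hc : l.getD mid 0 ≤ t
      · rw [if_pos hc]
        -- all indices ≤ mid hold, so countP ≥ mid + 1
        have hcount : mid + 1 ≤ l.countP (fun p => p ≤ t) := by
          have hsplit : l.countP (fun p => p ≤ t)
              = (l.take (mid+1)).countP (fun p => p ≤ t)
                + (l.drop (mid+1)).countP (fun p => p ≤ t) := by
            rw [← List.countP_append, List.take_append_drop]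
          have hall : (l.take (mid+1)).countP (fun p => p ≤ t) = (l.take (mid+1)).length := by
            rw [List.countP_eq_length]
            intro x hx
            obtain ⟨i, hi, hx⟩ := List.getElem_of_mem hx
            have hi' : i < mid + 1 := by
              have := hi; simp [List.length_take] at this; omega
            rw [List.getElem_take] at hx
            have : l[i]'(by omega) ≤ l[mid] := hmono i mid (by omega) hmlen (by omega)
            simp only [decide_eq_true_eq]
            rw [← hx] at *
            rw [hget] at hc
            omega
          have : (l.take (mid+1)).length = mid + 1 := by simp; omega
          omega
        exact ih (mid+1) hi (by omega) hcount h2 hlen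
      · rw [if_neg hc]
        -- all indices ≥ mid fail, so countP ≤ mid
        have hcount : l.countP (fun p => p ≤ t) ≤ mid := by
          have hsplit : l.countP (fun p => p ≤ t)
              = (l.take mid).countP (fun p => p ≤ t)
                + (l.drop mid).countP (fun p => p ≤ t) := by
            rw [← List.countP_append, List.take_append_drop]
          have hz : (l.drop mid).countP (fun p => p ≤ t) = 0 := by
            rw [List.countP_eq_zero]
            intro x hx
            obtain ⟨i, hi, hx⟩ := List.getElem_of_mem hx
            rw [List.getElem_drop] at hx
            have : l[mid] ≤ l[mid + i]'(by simp at hi; omega) :=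
              hmono mid (mid + i) hmlen (by simp at hi; omega) (by omega)
            rw [hget] at hc
            simp only [decide_eq_true_eq]
            rw [← hx] at *
            omega
          have hle : (l.take mid).countP (fun p => p ≤ t) ≤ (l.take mid).length :=
            List.countP_le_length
          have : (l.take mid).length = mid := by simp; omega
          omega
        exact ih lo mid (by omega) h1 hcount (by omega)
    · rw [dif_neg h]; omega

lemma buildPrefix_fst (msgs : List String) : (buildPrefix msgs).1 = psums msgs 0 := by
  unfold buildPrefix
  rw [buildPrefix_go]
  simp

-- ===== VERDICT (by name: the statement is the Claim_ definition above) =====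
theorem truncate_head_py_spec : Claim_equal_truncate_head_py := by
  intro messages target_length _
  unfold Spec_truncate_head_py truncate_head_py truncate_head_py_alt
  rw [truncAGo_eq]
  simp only [buildPrefix_fst]
  have hc : (psums messages 0).countP (fun p => p ≤ target_length)
      = cnt messages target_length := by
    have := countP_psums messages 0 target_length
    simpa using this
  have hb : bsearchGo (psums messages 0) target_length 0 (psums messages 0).length
      = (psums messages 0).countP (fun p => p ≤ target_length) :=
    bsearchGo_eq (psums messages 0) target_length (psums_pairwise messages 0)
      ((psums messages 0).length) 0 ((psums messages 0).length)
      (by omega) (by omega) List.countP_le_length (le_refl _)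
  rw [hb, hc, PySem.List.slice_to_natCast]
  simp
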